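-- pv_equiv track=rewrite | github.com/enspyrco/tech_world | tool/generate_dart_barriers.py | format_dart_set
-- ===== SOURCE A (Python) =====
-- def find_contiguous_ranges(indices: list[int]) -> list[tuple[int, int]]:
--     """Group sorted indices into (start, end) inclusive ranges."""
--     if not indices:
--         return []
--     ranges = []
--     start = end = indices[0]
--     for i in indices[1:]:
--         if i == end + 1:
--             end = i
--         else:
--             ranges.append((start, end))
--             start = end = i
--     ranges.append((start, end))
--     return ranges
--
-- def format_dart_set(var_name: str, indices: list[int], columns: int) -> str:
--     """Format as compact Dart Set<int> with range-based for loops."""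
--     ranges = find_contiguous_ranges(sorted(indices))
--
--     lines = [f"final Set<int> _{var_name}Barriers = {{"]
--
--     for start, end in ranges:
--         count = end - start + 1
--         start_row = start // columns
--         end_row = end // columns
--
--         if count >= 10:
--             lines.append(
--                 f"  for (int i = {start}; i <= {end}; i++) i, "
--                 f"// rows {start_row}–{end_row} ({count} tiles)"
--             )
--         elif count >= 4:
--             # Short range, still use for loop
--             lines.append(
--                 f"  for (int i = {start}; i <= {end}; i++) i, // row {start_row}"
--             )
--         else:
--             vals = ", ".join(str(i) for i in range(start, end + 1))
--             lines.append(f"  {vals}, // row {start_row}")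
--
--     lines.append("};")
--     return "\n".join(lines)
-- ===== SOURCE B (Python) =====
-- def _split_run(end, it):
--     """Advance the iterator through the consecutive run continuing at `end`;
--     return the run's end and the first element after it (None if exhausted)."""
--     nxt = next(it, None)
--     while nxt is not None and nxt == end + 1:
--         end = nxt
--         nxt = next(it, None)
--     return end, nxt
--
--
-- def _line(start, end, columns):
--     count = end - start + 1
--     start_row = start // columns
--     end_row = end // columns
--     if count >= 10:
--         return (f"  for (int i = {start}; i <= {end}; i++) i, "
--                 f"// rows {start_row}\u2013{end_row} ({count} tiles)")
--     if count >= 4: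
--         return f"  for (int i = {start}; i <= {end}; i++) i, // row {start_row}"
--     vals = ", ".join(str(i) for i in range(start, end + 1))
--     return f"  {vals}, // row {start_row}"
--
--
-- def format_dart_set(var_name: str, indices: list[int], columns: int) -> str:
--     """Format as compact Dart Set<int> with range-based for loops."""
--     lines = [f"final Set<int> _{var_name}Barriers = {{"]
--     it = iter(sorted(indices))
--     nxt = next(it, None)
--     while nxt is not None:
--         start = nxt
--         end, nxt = _split_run(start, it)
--         lines.append(_line(start, end, columns))
--     lines.append("};")
--     return "\n".join(lines)
-- ===== Notes on version B (the rewrite author's own statement) =====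
-- stated objective: simpler
-- what changed: A builds an intermediate list of (start,end) ranges with a start/end accumulator state machine and then formats it in a second loop; B makes a single fused pass over an iterator of the sorted indices, splitting off one consecutive run at a time with a helper and emitting each formatted Dart line immediately (no intermediate ranges list).
import Mathlib
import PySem

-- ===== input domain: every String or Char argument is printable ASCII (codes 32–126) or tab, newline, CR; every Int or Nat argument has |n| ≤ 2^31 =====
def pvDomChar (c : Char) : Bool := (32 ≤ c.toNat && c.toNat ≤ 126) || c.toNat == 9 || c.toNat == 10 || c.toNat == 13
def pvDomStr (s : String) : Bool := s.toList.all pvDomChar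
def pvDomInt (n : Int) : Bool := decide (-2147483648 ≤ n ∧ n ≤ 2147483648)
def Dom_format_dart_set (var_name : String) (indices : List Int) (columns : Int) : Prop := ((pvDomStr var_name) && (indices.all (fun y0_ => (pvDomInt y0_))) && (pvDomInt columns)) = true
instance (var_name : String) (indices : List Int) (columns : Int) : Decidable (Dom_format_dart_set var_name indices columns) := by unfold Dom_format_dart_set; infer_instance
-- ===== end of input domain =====

-- B replaces A's two-pass "build (start,end) ranges with a state machine, then format" by a
-- single pass that repeatedly splits off the leading consecutive run of the sorted list and
-- emits each formatted line immediately (objective: simpler, same cost).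

-- ===== PORT A =====
-- helper of A: find_contiguous_ranges (its for-loop over indices[1:] as structural recursion)
def find_contiguous_ranges_aux (start e : Int) : List Int → List (Int × Int)
  | [] => [(start, e)]
  | i :: t => if i = e + 1 then find_contiguous_ranges_aux start i t
              else (start, e) :: find_contiguous_ranges_aux i i t

def find_contiguous_ranges (indices : List Int) : List (Int × Int) :=
  match indices with
  | [] => []
  | h :: t => find_contiguous_ranges_aux h h t

def format_dart_set (var_name : String) (indices : List Int) (columns : Int) : String :=
  let ranges := find_contiguous_ranges (PySem.List.sorted indices id false)
  let lines : List String := ["final Set<int> _" ++ var_name ++ "Barriers = {"]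
  let lines := ranges.foldl (fun acc p =>
    let start := p.1
    let e := p.2
    let count := e - start + 1
    let start_row := PySem.Int.floordiv start columns
    let end_row := PySem.Int.floordiv e columns
    acc ++ [ if count ≥ 10 then
        "  for (int i = " ++ PySem.Int.toStr start ++ "; i <= " ++ PySem.Int.toStr e ++
        "; i++) i, // rows " ++ PySem.Int.toStr start_row ++ "–" ++ PySem.Int.toStr end_row ++
        " (" ++ PySem.Int.toStr count ++ " tiles)"
      else if count ≥ 4 then
        "  for (int i = " ++ PySem.Int.toStr start ++ "; i <= " ++ PySem.Int.toStr e ++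
        "; i++) i, // row " ++ PySem.Int.toStr start_row
      else
        "  " ++ PySem.Str.join ", " ((PySem.List.pyRange start (e + 1) 1).map PySem.Int.toStr) ++
        ", // row " ++ PySem.Int.toStr start_row ]) lines
  PySem.Str.join "\n" (lines ++ ["};"])

-- ===== PORT B =====
-- helper of B: _split_run's inner while loop as structural recursion on the suffix
def splitRun (e : Int) : List Int → Int × List Int
  | [] => (e, [])
  | x :: t => if x = e + 1 then splitRun x t else (e, x :: t)

theorem splitRun_snd_length_le (t : List Int) : ∀ e : Int, (splitRun e t).2.length ≤ t.length := by
  induction t with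
  | nil => intro e; simp [splitRun]
  | cons x t ih =>
      intro e
      by_cases h : x = e + 1
      · subst h
        simp only [splitRun, if_pos]
        exact Nat.le_trans (ih (e + 1)) (Nat.le_succ _)
      · simp [splitRun, h]

-- helper of B: _line
def lineB (start e columns : Int) : String :=
  let count := e - start + 1
  let start_row := PySem.Int.floordiv start columns
  let end_row := PySem.Int.floordiv e columns
  if count ≥ 10 then
    "  for (int i = " ++ PySem.Int.toStr start ++ "; i <= " ++ PySem.Int.toStr e ++
    "; i++) i, // rows " ++ PySem.Int.toStr start_row ++ "–" ++ PySem.Int.toStr end_row ++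
    " (" ++ PySem.Int.toStr count ++ " tiles)"
  else if count ≥ 4 then
    "  for (int i = " ++ PySem.Int.toStr start ++ "; i <= " ++ PySem.Int.toStr e ++
    "; i++) i, // row " ++ PySem.Int.toStr start_row
  else
    "  " ++ PySem.Str.join ", " ((PySem.List.pyRange start (e + 1) 1).map PySem.Int.toStr) ++
    ", // row " ++ PySem.Int.toStr start_row

-- B's while loop over the remaining sorted suffix
def emitLines (columns : Int) : List Int → List String
  | [] => []
  | x :: t =>
      let p := splitRun x t
      lineB x p.1 columns :: emitLines columns p.2
termination_by l => l.length
decreasing_by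
  exact Nat.lt_succ_of_le (splitRun_snd_length_le t x)

def format_dart_set_alt (var_name : String) (indices : List Int) (columns : Int) : String :=
  let lines : List String :=
    ("final Set<int> _" ++ var_name ++ "Barriers = {")
      :: emitLines columns (PySem.List.sorted indices id false)
  PySem.Str.join "\n" (lines ++ ["};"])

-- ===== PRECONDITION & SPEC =====
-- Pre_ excludes only the inputs where Python A raises ZeroDivisionError: columns = 0 with a
-- non-empty indices list (B's Python raises there too).
def Pre_format_dart_set (var_name : String) (indices : List Int) (columns : Int) : Prop :=
  indices = [] ∨ columns ≠ 0
instance (var_name : String) (indices : List Int) (columns : Int) : Decidable (Pre_format_dart_set var_name indices columns) := by unfold Pre_format_dart_set; infer_instance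

def pvWitness_format_dart_set : String × List Int × Int := ("maze", [3, 1, 2, 9], 12)

def Spec_format_dart_set (var_name : String) (indices : List Int) (columns : Int) (out : String) : Prop := out = format_dart_set_alt var_name indices columns
instance (var_name : String) (indices : List Int) (columns : Int) (out : String) : Decidable (Spec_format_dart_set var_name indices columns out) := by unfold Spec_format_dart_set; infer_instance

-- ===== CLAIM (what is proved, stated in full; the proofs are below) =====
def Claim_equal_format_dart_set : Prop := ∀ (var_name : String) (indices : List Int) (columns : Int), Dom_format_dart_set var_name indices columns → Pre_format_dart_set var_name indices columns → Spec_format_dart_set var_name indices columns (format_dart_set var_name indices columns)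

-- ===== LEMMAS AND PROOFS =====

theorem fcr_aux_eq_splitRun (t : List Int) : ∀ s e : Int,
    find_contiguous_ranges_aux s e t
      = (s, (splitRun e t).1) :: find_contiguous_ranges (splitRun e t).2 := by
  induction t with
  | nil => intro s e; simp [find_contiguous_ranges_aux, splitRun, find_contiguous_ranges]
  | cons x t ih =>
      intro s e
      by_cases h : x = e + 1
      · subst h
        simp only [find_contiguous_ranges_aux, splitRun, if_pos]
        exact ih s (e + 1)
      · simp [find_contiguous_ranges_aux, splitRun, h, find_contiguous_ranges]

theorem emitLines_eq_aux (columns : Int) : ∀ (n : Nat) (s : List Int), s.length ≤ n →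
    emitLines columns s = (find_contiguous_ranges s).map (fun p => lineB p.1 p.2 columns) := by
  intro n
  induction n with
  | zero =>
      intro s hs
      have hnil : s = [] := List.eq_nil_of_length_eq_zero (Nat.le_zero.mp hs)
      subst hnil
      simp [emitLines, find_contiguous_ranges]
  | succ n ih =>
      intro s hs
      cases s with
      | nil => simp [emitLines, find_contiguous_ranges]
      | cons x t =>
          rw [emitLines, show find_contiguous_ranges (x :: t) = find_contiguous_ranges_aux x x t from rfl,
            fcr_aux_eq_splitRun t x x, List.map_cons,
            ih (splitRun x t).2
              (Nat.le_trans (splitRun_snd_length_le t x) (Nat.le_of_succ_le_succ hs))]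

theorem emitLines_eq (columns : Int) (s : List Int) :
    emitLines columns s = (find_contiguous_ranges s).map (fun p => lineB p.1 p.2 columns) :=
  emitLines_eq_aux columns s.length s (Nat.le_refl _)

theorem foldl_append_map {α β : Type} (f : α → β) :
    ∀ (l : List α) (init : List β),
      l.foldl (fun acc x => acc ++ [f x]) init = init ++ l.map f := by
  intro l
  induction l with
  | nil => intro init; simp
  | cons x t ih => intro init; simp [List.foldl_cons, ih]

-- ===== VERDICT (by name: the statement is the Claim_ definition above) =====
theorem format_dart_set_spec : Claim_equal_format_dart_set := by
  intro var_name indices columns _ _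
  unfold Spec_format_dart_set format_dart_set format_dart_set_alt
  rw [emitLines_eq]
  simp only [foldl_append_map]
  rfl
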